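-- pv_equiv track=rewrite | github.com/aLexzzz430/Cognitive-OS | core/reasoning/arc_program_dsl.py | infer_arc_program_tags
-- ===== SOURCE A (Python) =====
-- from typing import Any, Dict, List, Mapping, Optional, Sequence
--
-- def infer_arc_program_tags(name: str, kind: str = "") -> List[str]:
--     haystack = f"{name} {kind}".lower()
--     tags: List[str] = []
--     if "identity" in haystack:
--         tags.append("identity")
--     if "constant" in haystack:
--         tags.append("constant")
--     if any(token in haystack for token in ("crop", "component")):
--         tags.append("crop")
--     if any(token in haystack for token in ("flip", "rotate", "transpose")):
--         tags.append("transform")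
--     if "component_layout" in haystack or "layout" in haystack:
--         tags.append("layout")
--         tags.append("component_reorder")
--     if "color" in haystack or "remap" in haystack:
--         tags.append("color_remap")
--     if "local_rule" in haystack:
--         tags.append("local_rule")
--         tags.append("conditional_rule")
--     if "panel_trace" in haystack or "marker" in haystack:
--         tags.append("marker_guided")
--     if "component" in haystack:
--         tags.append("object_centric")
--     if "sim:" in haystack or "->" in haystack:
--         tags.append("composed")
--     deduped: List[str] = []
--     for tag in tags:
--         if tag not in deduped:
--             deduped.append(tag)
--     return deduped
-- ===== SOURCE B (Python) =====
-- _TOKENS = ("identity", "constant", "crop", "component", "flip", "rotate",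
--            "transpose", "layout", "color", "remap", "local_rule",
--            "panel_trace", "marker", "sim:", "->")
--
-- # One row per OUTPUT tag (in A's emission order): tag -> the set of tokens
-- # whose presence triggers it.  ("component_layout" is redundant: it contains
-- # both "layout" and "component" as substrings.)
-- _TAG_RULES = [
--     ("identity", frozenset({"identity"})),
--     ("constant", frozenset({"constant"})),
--     ("crop", frozenset({"crop", "component"})),
--     ("transform", frozenset({"flip", "rotate", "transpose"})),
--     ("layout", frozenset({"layout"})),
--     ("component_reorder", frozenset({"layout"})),
--     ("color_remap", frozenset({"color", "remap"})),
--     ("local_rule", frozenset({"local_rule"})),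
--     ("conditional_rule", frozenset({"local_rule"})),
--     ("marker_guided", frozenset({"panel_trace", "marker"})),
--     ("object_centric", frozenset({"component"})),
--     ("composed", frozenset({"sim:", "->"})),
-- ]
--
--
-- def infer_arc_program_tags(name, kind=""):
--     haystack = (name + " " + kind).lower()
--     # Single left-to-right scan of the text: at each position record every
--     # token that starts there, building the set of tokens present.
--     found = set()
--     for i in range(len(haystack)):
--         for tok in _TOKENS:
--             if haystack[i:i + len(tok)] == tok:
--                 found.add(tok)
--     # Emit each tag (once, in fixed order) whose trigger set was hit.
--     return [tag for tag, toks in _TAG_RULES if not found.isdisjoint(toks)]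
-- ===== Notes on version B (the rewrite author's own statement) =====
-- stated objective: alternative
-- what changed: Instead of running a separate substring search over the text for each keyword in ten if/append branches plus a manual dedup pass, B scans the lowercased text left-to-right once, recording at each position every keyword that starts there into a found-set, then emits tags from a per-tag trigger table (the redundant 'component_layout' test is dropped since it contains 'layout').
import Mathlib
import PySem

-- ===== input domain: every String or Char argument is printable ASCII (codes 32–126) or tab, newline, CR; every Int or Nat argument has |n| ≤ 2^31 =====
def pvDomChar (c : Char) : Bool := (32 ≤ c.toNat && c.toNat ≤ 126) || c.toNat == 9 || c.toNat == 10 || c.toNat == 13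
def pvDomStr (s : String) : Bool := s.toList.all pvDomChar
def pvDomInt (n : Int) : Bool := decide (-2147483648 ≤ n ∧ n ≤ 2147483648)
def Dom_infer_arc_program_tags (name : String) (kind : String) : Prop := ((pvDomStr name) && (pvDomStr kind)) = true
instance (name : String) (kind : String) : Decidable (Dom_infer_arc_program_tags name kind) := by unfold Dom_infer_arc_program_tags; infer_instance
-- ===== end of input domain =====

-- B replaces A's per-keyword substring tests and manual dedup by a single left-to-right scan of
-- the text that builds the set of keywords present, then a per-tag trigger table (alternative
-- algorithm; not claimed faster).


-- ===== PORT A =====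
-- Port of A: haystack, ten conditional appends into `tags`, then a manual dedup pass.
def infer_arc_program_tags (name : String) (kind : String) : List String :=
  let haystack := PySem.Str.lower (name ++ " " ++ kind)
  let tags : List String := []
  let tags := if PySem.Str.isIn "identity" haystack then tags ++ ["identity"] else tags
  let tags := if PySem.Str.isIn "constant" haystack then tags ++ ["constant"] else tags
  let tags := if ["crop", "component"].any (fun t => PySem.Str.isIn t haystack) then tags ++ ["crop"] else tags
  let tags := if ["flip", "rotate", "transpose"].any (fun t => PySem.Str.isIn t haystack) then tags ++ ["transform"] else tags
  let tags := if PySem.Str.isIn "component_layout" haystack || PySem.Str.isIn "layout" haystack then (tags ++ ["layout"]) ++ ["component_reorder"] else tags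
  let tags := if PySem.Str.isIn "color" haystack || PySem.Str.isIn "remap" haystack then tags ++ ["color_remap"] else tags
  let tags := if PySem.Str.isIn "local_rule" haystack then (tags ++ ["local_rule"]) ++ ["conditional_rule"] else tags
  let tags := if PySem.Str.isIn "panel_trace" haystack || PySem.Str.isIn "marker" haystack then tags ++ ["marker_guided"] else tags
  let tags := if PySem.Str.isIn "component" haystack then tags ++ ["object_centric"] else tags
  let tags := if PySem.Str.isIn "sim:" haystack || PySem.Str.isIn "->" haystack then tags ++ ["composed"] else tags
  tags.foldl (fun deduped tag => if deduped.contains tag then deduped else deduped ++ [tag]) []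

-- ===== PORT B =====
-- B-side keyword list (_TOKENS in Source B).
def pvTokens : List String :=
  ["identity", "constant", "crop", "component", "flip", "rotate",
   "transpose", "layout", "color", "remap", "local_rule",
   "panel_trace", "marker", "sim:", "->"]

-- B-side per-tag trigger table (_TAG_RULES in Source B); the trigger sets are literal distinct lists.
def pvTagRules : List (String × List String) :=
  [("identity", ["identity"]),
   ("constant", ["constant"]),
   ("crop", ["crop", "component"]),
   ("transform", ["flip", "rotate", "transpose"]),
   ("layout", ["layout"]),
   ("component_reorder", ["layout"]),
   ("color_remap", ["color", "remap"]),
   ("local_rule", ["local_rule"]),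
   ("conditional_rule", ["local_rule"]),
   ("marker_guided", ["panel_trace", "marker"]),
   ("object_centric", ["component"]),
   ("composed", ["sim:", "->"])]

-- Port of B: one scan over the text positions building the set of tokens found
-- (haystack[i:i+len(tok)] == tok), then the tag comprehension over pvTagRules.
def infer_arc_program_tags_alt (name : String) (kind : String) : List String :=
  let haystack := PySem.Str.lower (name ++ " " ++ kind)
  let found : PySem.Set String :=
    (PySem.List.pyRange 0 (PySem.Str.len haystack) 1).foldl
      (fun found i => pvTokens.foldl
        (fun f tok =>
          if PySem.Str.slice haystack (some i) (some (i + PySem.Str.len tok)) = tok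
          then PySem.Set.add f tok else f) found)
      PySem.Set.empty
  (pvTagRules.filter (fun r => !(PySem.Set.isdisjoint found r.2))).map (fun r => r.1)

-- ===== PRECONDITION & SPEC =====
def Spec_infer_arc_program_tags (name : String) (kind : String) (out : List String) : Prop := out = infer_arc_program_tags_alt name kind
instance (name : String) (kind : String) (out : List String) : Decidable (Spec_infer_arc_program_tags name kind out) := by unfold Spec_infer_arc_program_tags; infer_instance

-- ===== CLAIM (what is proved, stated in full; the proofs are below) =====
def Claim_equal_infer_arc_program_tags : Prop := ∀ (name : String) (kind : String), Dom_infer_arc_program_tags name kind → Spec_infer_arc_program_tags name kind (infer_arc_program_tags name kind)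

-- ===== LEMMAS AND PROOFS =====

-- membership after the inner fold over the token list
lemma pv_mem_inner (h : String) (i : Int) (toks : List String) (f : PySem.Set String) (x : String) :
    x ∈ toks.foldl
      (fun f tok =>
        if PySem.Str.slice h (some i) (some (i + PySem.Str.len tok)) = tok
        then PySem.Set.add f tok else f) f ↔
    x ∈ f ∨ (x ∈ toks ∧ PySem.Str.slice h (some i) (some (i + PySem.Str.len x)) = x) := by
  induction toks generalizing f with
  | nil => simp
  | cons t ts ih =>
    simp only [List.foldl_cons, ih]
    by_cases hc : PySem.Str.slice h (some i) (some (i + PySem.Str.len t)) = t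
    · simp only [hc, if_pos, PySem.Set.mem_add, List.mem_cons]
      constructor
      · rintro (⟨hf | rfl⟩ | hr)
        · exact Or.inl hf
        · exact Or.inr ⟨Or.inl rfl, hc⟩
        · exact Or.inr ⟨Or.inr hr.1, hr.2⟩
      · rintro (hf | ⟨(rfl | hm), hs⟩)
        · exact Or.inl (Or.inl hf)
        · exact Or.inl (Or.inr rfl)
        · exact Or.inr ⟨hm, hs⟩
    · simp only [hc, if_neg, not_false_iff, List.mem_cons]
      constructor
      · rintro (hf | hr)
        · exact Or.inl hf
        · exact Or.inr ⟨Or.inr hr.1, hr.2⟩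
      · rintro (hf | ⟨(rfl | hm), hs⟩)
        · exact Or.inl hf
        · exact absurd hs hc
        · exact Or.inr ⟨hm, hs⟩

-- membership after the outer fold over the index list
lemma pv_mem_scan (h : String) (idxs : List Int) (f : PySem.Set String) (x : String) :
    x ∈ idxs.foldl
      (fun found i => pvTokens.foldl
        (fun f tok =>
          if PySem.Str.slice h (some i) (some (i + PySem.Str.len tok)) = tok
          then PySem.Set.add f tok else f) found) f ↔
    x ∈ f ∨ (x ∈ pvTokens ∧ ∃ i ∈ idxs, PySem.Str.slice h (some i) (some (i + PySem.Str.len x)) = x) := by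
  induction idxs generalizing f with
  | nil => simp
  | cons j js ih =>
    simp only [List.foldl_cons, ih, pv_mem_inner, List.mem_cons]
    constructor
    · rintro ((hf | ⟨hm, hs⟩) | ⟨hm, i, hi, hs⟩)
      · exact Or.inl hf
      · exact Or.inr ⟨hm, j, Or.inl rfl, hs⟩
      · exact Or.inr ⟨hm, i, Or.inr hi, hs⟩
    · rintro (hf | ⟨hm, i, (rfl | hi), hs⟩)
      · exact Or.inl (Or.inl hf)
      · exact Or.inl (Or.inr ⟨hm, hs⟩)
      · exact Or.inr ⟨hm, i, hi, hs⟩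

lemma pv_exists_slice_iff (h tok : String) (hne : tok.toList ≠ []) :
    (∃ i ∈ PySem.List.pyRange 0 (PySem.Str.len h) 1,
        PySem.Str.slice h (some i) (some (i + PySem.Str.len tok)) = tok) ↔
    PySem.Str.isIn tok h = true := by
  rw [PySem.Str.isIn_eq, ← PySem.Chars.exists_prefix_drop_iff_isIn]
  constructor
  · rintro ⟨i, hi, hs⟩
    rw [PySem.List.mem_pyRange_one] at hi
    obtain ⟨j, rfl⟩ : ∃ j : Nat, i = (j : Int) := ⟨i.toNat, (Int.toNat_of_nonneg hi.1).symm⟩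
    refine ⟨j, ?_⟩
    have h1 := congrArg String.toList hs
    rw [PySem.Str.toList_slice, PySem.Chars.slice_eq_listSlice, PySem.Str.len_eq,
      PySem.List.slice_natCast_add] at h1
    rw [List.prefix_iff_eq_take]
    exact h1.symm
  · rintro ⟨j, hp⟩
    have hj : j < h.toList.length := by
      by_contra hge
      rw [List.drop_eq_nil_of_le (by omega)] at hp
      exact hne (List.prefix_nil.mp hp)
    refine ⟨(j : Int), ?_, ?_⟩
    · rw [PySem.List.mem_pyRange_one, PySem.Str.len_eq]
      constructor
      · exact Int.natCast_nonneg j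
      · exact_mod_cast hj
    · rw [← String.toList_inj, PySem.Str.toList_slice, PySem.Chars.slice_eq_listSlice,
        PySem.Str.len_eq, PySem.List.slice_natCast_add]
      exact (List.prefix_iff_eq_take.mp hp).symm

-- characterization of `found` membership
lemma pv_mem_found (h x : String) (hx : x ∈ pvTokens) (hne : x.toList ≠ []) :
    x ∈ (PySem.List.pyRange 0 (PySem.Str.len h) 1).foldl
      (fun found i => pvTokens.foldl
        (fun f tok =>
          if PySem.Str.slice h (some i) (some (i + PySem.Str.len tok)) = tok
          then PySem.Set.add f tok else f) found)
      PySem.Set.empty ↔ PySem.Str.isIn x h = true := by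
  rw [pv_mem_scan]
  simp only [PySem.Set.empty, List.not_mem_nil, false_or]
  rw [pv_exists_slice_iff h x hne]
  tauto


lemma pv_ite_append {α : Type} (c : Prop) [Decidable c] (acc l : List α) :
    (if c then acc ++ l else acc) = acc ++ (if c then l else []) := by
  split <;> simp

lemma pv_ite_append2 {α : Type} (c : Prop) [Decidable c] (acc : List α) (x y : α) :
    (if c then (acc ++ [x]) ++ [y] else acc) = acc ++ (if c then [x, y] else []) := by
  split <;> simp

lemma pv_foldl_dedup {α : Type} [DecidableEq α] (l acc : List α) (h : (acc ++ l).Nodup) :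
    l.foldl (fun deduped tag => if deduped.contains tag then deduped else deduped ++ [tag]) acc
      = acc ++ l := by
  induction l generalizing acc with
  | nil => simp
  | cons a t ih =>
    have hmem : a ∉ acc ∧ ((acc ++ [a]) ++ t).Nodup := by
      constructor
      · intro hmm
        exact (List.disjoint_of_nodup_append h) hmm (List.mem_cons_self)
      · simpa using h
    have hc : acc.contains a = false := by
      simpa using hmem.1
    simp only [List.foldl_cons, hc, Bool.false_eq_true, if_false]
    rw [ih (acc ++ [a]) hmem.2]
    simp

def pvAllTags : List String :=
  ["identity", "constant", "crop", "transform", "layout", "component_reorder",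
   "color_remap", "local_rule", "conditional_rule", "marker_guided", "object_centric", "composed"]

lemma pv_ite_sublist {α : Type} (c : Prop) [Decidable c] (l : List α) :
    (if c then l else []).Sublist l := by
  split
  · exact List.Sublist.refl l
  · exact List.nil_sublist l

lemma pv_sublist (c1 c2 c3 c4 c5 c6 c7 c8 c9 c10 : Prop)
    [Decidable c1] [Decidable c2] [Decidable c3] [Decidable c4] [Decidable c5]
    [Decidable c6] [Decidable c7] [Decidable c8] [Decidable c9] [Decidable c10] :
    ((if c1 then ["identity"] else []) ++ ((if c2 then ["constant"] else []) ++
     ((if c3 then ["crop"] else []) ++ ((if c4 then ["transform"] else []) ++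
     ((if c5 then ["layout", "component_reorder"] else []) ++ ((if c6 then ["color_remap"] else []) ++
     ((if c7 then ["local_rule", "conditional_rule"] else []) ++ ((if c8 then ["marker_guided"] else []) ++
     ((if c9 then ["object_centric"] else []) ++ (if c10 then ["composed"] else [])))))))))).Sublist
      pvAllTags := by
  refine List.Sublist.append (pv_ite_sublist _ _) ?_
  refine List.Sublist.append (pv_ite_sublist _ _) ?_
  refine List.Sublist.append (pv_ite_sublist _ _) ?_
  refine List.Sublist.append (pv_ite_sublist _ _) ?_
  refine List.Sublist.append (pv_ite_sublist _ _) ?_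
  refine List.Sublist.append (pv_ite_sublist _ _) ?_
  refine List.Sublist.append (pv_ite_sublist _ _) ?_
  refine List.Sublist.append (pv_ite_sublist _ _) ?_
  exact List.Sublist.append (pv_ite_sublist _ _) (pv_ite_sublist _ _)

lemma pv_key (c1 c2 c3 c4 c5 c6 c7 c8 c9 c10 : Bool) :
    (List.foldl (fun deduped tag => if deduped.contains tag then deduped else deduped ++ [tag]) []
      (let tags : List String := []
       let tags := if c1 then tags ++ ["identity"] else tags
       let tags := if c2 then tags ++ ["constant"] else tags
       let tags := if c3 then tags ++ ["crop"] else tags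
       let tags := if c4 then tags ++ ["transform"] else tags
       let tags := if c5 then (tags ++ ["layout"]) ++ ["component_reorder"] else tags
       let tags := if c6 then tags ++ ["color_remap"] else tags
       let tags := if c7 then (tags ++ ["local_rule"]) ++ ["conditional_rule"] else tags
       let tags := if c8 then tags ++ ["marker_guided"] else tags
       let tags := if c9 then tags ++ ["object_centric"] else tags
       if c10 then tags ++ ["composed"] else tags)) =
    ((if c1 then ["identity"] else []) ++ ((if c2 then ["constant"] else []) ++
     ((if c3 then ["crop"] else []) ++ ((if c4 then ["transform"] else []) ++
     ((if c5 then ["layout", "component_reorder"] else []) ++ ((if c6 then ["color_remap"] else []) ++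
     ((if c7 then ["local_rule", "conditional_rule"] else []) ++ ((if c8 then ["marker_guided"] else []) ++
     ((if c9 then ["object_centric"] else []) ++ (if c10 then ["composed"] else [])))))))))) := by
  have hchain :
      (let tags : List String := []
       let tags := if c1 then tags ++ ["identity"] else tags
       let tags := if c2 then tags ++ ["constant"] else tags
       let tags := if c3 then tags ++ ["crop"] else tags
       let tags := if c4 then tags ++ ["transform"] else tags
       let tags := if c5 then (tags ++ ["layout"]) ++ ["component_reorder"] else tags
       let tags := if c6 then tags ++ ["color_remap"] else tags
       let tags := if c7 then (tags ++ ["local_rule"]) ++ ["conditional_rule"] else tags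
       let tags := if c8 then tags ++ ["marker_guided"] else tags
       let tags := if c9 then tags ++ ["object_centric"] else tags
       if c10 then tags ++ ["composed"] else tags) =
      ((if c1 then ["identity"] else []) ++ ((if c2 then ["constant"] else []) ++
       ((if c3 then ["crop"] else []) ++ ((if c4 then ["transform"] else []) ++
       ((if c5 then ["layout", "component_reorder"] else []) ++ ((if c6 then ["color_remap"] else []) ++
       ((if c7 then ["local_rule", "conditional_rule"] else []) ++ ((if c8 then ["marker_guided"] else []) ++
       ((if c9 then ["object_centric"] else []) ++ (if c10 then ["composed"] else [])))))))))) := by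
    rw [pv_ite_append, pv_ite_append, pv_ite_append, pv_ite_append2, pv_ite_append,
      pv_ite_append2, pv_ite_append, pv_ite_append, pv_ite_append, pv_ite_append]
    simp [List.append_assoc]
  rw [hchain]
  have hnodup : (([] : List String) ++
      ((if c1 then ["identity"] else []) ++ ((if c2 then ["constant"] else []) ++
       ((if c3 then ["crop"] else []) ++ ((if c4 then ["transform"] else []) ++
       ((if c5 then ["layout", "component_reorder"] else []) ++ ((if c6 then ["color_remap"] else []) ++
       ((if c7 then ["local_rule", "conditional_rule"] else []) ++ ((if c8 then ["marker_guided"] else []) ++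
       ((if c9 then ["object_centric"] else []) ++ (if c10 then ["composed"] else []))))))))))).Nodup := by
    rw [List.nil_append]
    exact List.Nodup.sublist
      (pv_sublist (c1 = true) (c2 = true) (c3 = true) (c4 = true) (c5 = true)
        (c6 = true) (c7 = true) (c8 = true) (c9 = true) (c10 = true))
      (by decide)
  rw [pv_foldl_dedup _ [] hnodup, List.nil_append]

-- ¬disjoint unfolds to an any-scan over the (literal) trigger list
lemma pv_not_disj (s t : List String) :
    (!(PySem.Set.isdisjoint s t)) = t.any (fun x => s.contains x) := by
  rw [Bool.eq_iff_iff, Bool.not_eq_true', ← Bool.not_eq_true (PySem.Set.isdisjoint s t)]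
  rw [Bool.not_eq_true, Bool.eq_false_iff]
  constructor
  · intro hne
    have : ¬ (∀ x ∈ s, x ∉ t) := fun hall => hne ((PySem.Set.isdisjoint_iff s t).mpr hall)
    push Not at this
    obtain ⟨x, hxs, hxt⟩ := this
    rw [List.any_eq_true]
    exact ⟨x, hxt, by simpa using hxs⟩
  · intro hany hdis
    rw [List.any_eq_true] at hany
    obtain ⟨x, hxt, hxs⟩ := hany
    exact ((PySem.Set.isdisjoint_iff s t).mp hdis) x (by simpa using hxs) hxt

-- contains on the scanned set = Python's substring test, for each token of pvTokens
lemma pv_contains_found (h x : String) (hx : x ∈ pvTokens) (hne : x.toList ≠ []) :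
    List.contains ((PySem.List.pyRange 0 (PySem.Str.len h) 1).foldl
      (fun found i => pvTokens.foldl
        (fun f tok =>
          if PySem.Str.slice h (some i) (some (i + PySem.Str.len tok)) = tok
          then PySem.Set.add f tok else f) found)
      PySem.Set.empty) x = PySem.Str.isIn x h := by
  rw [Bool.eq_iff_iff, List.contains_iff_mem]
  exact pv_mem_found h x hx hne

-- "component_layout" in h implies "layout" in h (substring), so the or collapses
lemma pv_cl_imp (h : String) :
    (PySem.Str.isIn "component_layout" h || PySem.Str.isIn "layout" h) = PySem.Str.isIn "layout" h := by
  cases hcl : PySem.Str.isIn "component_layout" h with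
  | false => simp
  | true =>
    have hl : PySem.Str.isIn "layout" h = true := by
      rw [PySem.Str.isIn_iff_infix] at hcl ⊢
      exact List.IsInfix.trans (by decide) hcl
    rw [hl, Bool.true_or]

lemma pv_fm {α β : Type} (p : α → Bool) (x : α) (l : List α) (f : α → β) :
    ((x :: l).filter p).map f = (if p x then [f x] else []) ++ (l.filter p).map f := by
  by_cases hp : p x = true <;> simp [hp]

lemma pv_pair {α : Type} (c : Bool) (x y : α) :
    (if c then [x, y] else []) = (if c then [x] else []) ++ (if c then [y] else []) := by
  cases c <;> simp

-- ===== VERDICT (by name: the statement is the Claim_ definition above) =====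
theorem infer_arc_program_tags_spec : Claim_equal_infer_arc_program_tags := by
  intro name kind _
  unfold Spec_infer_arc_program_tags infer_arc_program_tags infer_arc_program_tags_alt
  simp only [List.any_cons, List.any_nil, Bool.or_false]
  rw [pv_cl_imp, pv_key]
  simp only [pvTagRules, pv_fm, List.filter_nil, List.map_nil, pv_not_disj,
    List.any_cons, List.any_nil, Bool.or_false]
  rw [pv_contains_found (PySem.Str.lower (name ++ " " ++ kind)) "identity" (by decide) (by decide),
    pv_contains_found (PySem.Str.lower (name ++ " " ++ kind)) "constant" (by decide) (by decide),
    pv_contains_found (PySem.Str.lower (name ++ " " ++ kind)) "crop" (by decide) (by decide),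
    pv_contains_found (PySem.Str.lower (name ++ " " ++ kind)) "component" (by decide) (by decide),
    pv_contains_found (PySem.Str.lower (name ++ " " ++ kind)) "flip" (by decide) (by decide),
    pv_contains_found (PySem.Str.lower (name ++ " " ++ kind)) "rotate" (by decide) (by decide),
    pv_contains_found (PySem.Str.lower (name ++ " " ++ kind)) "transpose" (by decide) (by decide),
    pv_contains_found (PySem.Str.lower (name ++ " " ++ kind)) "layout" (by decide) (by decide),
    pv_contains_found (PySem.Str.lower (name ++ " " ++ kind)) "color" (by decide) (by decide),
    pv_contains_found (PySem.Str.lower (name ++ " " ++ kind)) "remap" (by decide) (by decide),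
    pv_contains_found (PySem.Str.lower (name ++ " " ++ kind)) "local_rule" (by decide) (by decide),
    pv_contains_found (PySem.Str.lower (name ++ " " ++ kind)) "panel_trace" (by decide) (by decide),
    pv_contains_found (PySem.Str.lower (name ++ " " ++ kind)) "marker" (by decide) (by decide),
    pv_contains_found (PySem.Str.lower (name ++ " " ++ kind)) "sim:" (by decide) (by decide),
    pv_contains_found (PySem.Str.lower (name ++ " " ++ kind)) "->" (by decide) (by decide)]
  rw [pv_pair (PySem.Str.isIn "layout" (PySem.Str.lower (name ++ " " ++ kind))) "layout" "component_reorder",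
    pv_pair (PySem.Str.isIn "local_rule" (PySem.Str.lower (name ++ " " ++ kind))) "local_rule" "conditional_rule"]
  simp only [List.append_assoc, List.append_nil]
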